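-- pv_equiv track=rewrite | github.com/Carlosmagnobrusil/CarlosBrusil_projects | Los_Fundamentos/basic_for_loops2.py | positives
-- ===== SOURCE A (Python) =====
-- def positives(lista1):
--     positive=[]
--     w=0
--     for y in lista1:
--         if y>0:
--             w= w + 1
--             positive.insert(len(lista1),w)
--         else:
--             positive.append(y)
--     return positive
-- ===== SOURCE B (Python) =====
-- def positives(lista1):
--     counts = []
--     c = 0
--     for y in lista1:
--         c += 1 if y > 0 else 0
--         counts.append(c)
--     return [c if y > 0 else y for y, c in zip(lista1, counts)]
-- ===== Notes on version B (the rewrite author's own statement) =====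
-- stated objective: alternative
-- what changed: B first builds a prefix-count table of positives, then assembles the result by a zip comprehension picking the running count or the element, instead of A's single loop with an inline counter (and A's positive.insert(len(lista1), w), which is just append).
import Mathlib
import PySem

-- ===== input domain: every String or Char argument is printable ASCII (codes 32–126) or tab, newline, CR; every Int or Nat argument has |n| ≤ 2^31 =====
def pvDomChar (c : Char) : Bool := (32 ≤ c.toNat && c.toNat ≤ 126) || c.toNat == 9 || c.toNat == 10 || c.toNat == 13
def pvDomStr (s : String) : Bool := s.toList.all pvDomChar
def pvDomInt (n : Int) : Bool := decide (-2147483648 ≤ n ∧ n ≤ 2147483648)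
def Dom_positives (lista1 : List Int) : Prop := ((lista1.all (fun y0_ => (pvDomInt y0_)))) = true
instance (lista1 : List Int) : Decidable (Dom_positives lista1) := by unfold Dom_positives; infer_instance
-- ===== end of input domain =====

-- B replaces A's inline stateful counter with a precomputed prefix-count table assembled by a zip (alternative decomposition, same cost).
-- ===== PORT A =====
-- positive.insert(len(lista1), w): index = len(lista1) ≥ len(positive), so Python's insert appends (exact here)
def positives (lista1 : List Int) : List Int :=
  (lista1.foldl (fun (s : List Int × Int) y =>
    if y > 0 then (s.1 ++ [s.2 + 1], s.2 + 1) else (s.1 ++ [y], s.2)) ([], 0)).1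

-- ===== PORT B =====
def altCounts : List Int → Int → List Int
  | [], _ => []
  | y :: ys, c =>
    let c' := c + (if y > 0 then 1 else 0)
    c' :: altCounts ys c'

def positives_alt (lista1 : List Int) : List Int :=
  (lista1.zip (altCounts lista1 0)).map (fun yc => if yc.1 > 0 then yc.2 else yc.1)

-- ===== PRECONDITION & SPEC =====
def Spec_positives (lista1 : List Int) (out : List Int) : Prop := out = positives_alt lista1
instance (lista1 : List Int) (out : List Int) : Decidable (Spec_positives lista1 out) := by unfold Spec_positives; infer_instance

-- ===== CLAIM (what is proved, stated in full; the proofs are below) =====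
def Claim_equal_positives : Prop := ∀ (lista1 : List Int), Dom_positives lista1 → Spec_positives lista1 (positives lista1)

-- ===== LEMMAS AND PROOFS =====

-- ===== VERDICT (by name: the statement is the Claim_ definition above) =====
theorem positives_aux (l : List Int) (acc : List Int) (w : Int) :
    (l.foldl (fun (s : List Int × Int) y =>
      if y > 0 then (s.1 ++ [s.2 + 1], s.2 + 1) else (s.1 ++ [y], s.2)) (acc, w)).1
    = acc ++ (l.zip (altCounts l w)).map (fun yc => if yc.1 > 0 then yc.2 else yc.1) := by
  induction l generalizing acc w with
  | nil => simp
  | cons y ys ih =>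
    by_cases h : y > 0 <;>
      simp [List.foldl, altCounts, h, ih, List.append_assoc]

theorem positives_spec : Claim_equal_positives := by
  intro l _
  unfold Spec_positives positives positives_alt
  simpa using positives_aux l [] 0
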